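-- pv_equiv track=rewrite | github.com/pobeaulieu/MicroserviceML | microminer/helpers/mapper.py | map_class_labels_to_categories
-- ===== SOURCE A (Python) =====
-- def map_class_labels_to_categories(class_labels_dict):
--     """
--     Maps class labels to their respective categories: application, entity, and utility classes.
--     Takes a dictionary where keys are class names and values are their corresponding labels.
--     """
--     application_classes = []
--     entity_classes = []
--     utility_classes = []
--
--     for class_name, class_label in class_labels_dict.items():
--         class_info = {"className": class_name}
--         if class_label == 0:
--             application_classes.append(class_info)
--         elif class_label == 1:
--             utility_classes.append(class_info)
--         elif class_label == 2:
--             entity_classes.append(class_info)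
--
--     return {
--         "applicationClasses": application_classes,
--         "entityClasses": entity_classes,
--         "utilityClasses": utility_classes
--     }
-- ===== SOURCE B (Python) =====
-- def map_class_labels_to_categories(class_labels_dict):
--     # Sort the kept items stably by label, then cut the sorted run into the
--     # three contiguous label blocks; stability preserves per-bucket order.
--     kept = sorted(
--         (p for p in class_labels_dict.items() if p[1] in (0, 1, 2)),
--         key=lambda p: p[1],
--     )
--     infos = [{"className": name} for name, _ in kept]
--     labels = [label for _, label in kept]
--     n0 = labels.count(0)
--     n01 = n0 + labels.count(1)
--     return {
--         "applicationClasses": infos[:n0],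
--         "entityClasses": infos[n01:],
--         "utilityClasses": infos[n0:n01],
--     }
-- ===== Notes on version B (the rewrite author's own statement) =====
-- stated objective: alternative
-- what changed: Replaces A's single dispatching pass with three mutable accumulators by a stable sort of the kept items on their label followed by counting and slicing the sorted run into the three contiguous label blocks.
import Mathlib
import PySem

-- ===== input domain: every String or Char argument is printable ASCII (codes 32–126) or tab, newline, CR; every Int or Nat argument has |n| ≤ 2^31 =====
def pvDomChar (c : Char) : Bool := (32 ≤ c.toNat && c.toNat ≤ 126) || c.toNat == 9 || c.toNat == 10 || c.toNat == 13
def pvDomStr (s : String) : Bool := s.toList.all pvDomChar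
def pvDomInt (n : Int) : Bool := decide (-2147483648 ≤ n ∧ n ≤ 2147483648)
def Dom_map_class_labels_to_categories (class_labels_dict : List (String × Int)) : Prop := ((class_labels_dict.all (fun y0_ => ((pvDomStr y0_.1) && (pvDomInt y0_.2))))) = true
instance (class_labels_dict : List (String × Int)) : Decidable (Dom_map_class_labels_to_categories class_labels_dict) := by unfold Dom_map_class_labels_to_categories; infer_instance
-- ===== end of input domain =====

-- B sorts the kept items stably by label and slices the sorted run into the three
-- contiguous label blocks, instead of A's single dispatching pass over three
-- mutable accumulators (objective: alternative; not faster).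


-- ===== PORT A =====
-- one pass over the items; state = (application_classes, entity_classes, utility_classes)
def pvStepA (acc : List (List (String × String)) × List (List (String × String)) × List (List (String × String)))
    (p : String × Int) :
    List (List (String × String)) × List (List (String × String)) × List (List (String × String)) :=
  let class_info : List (String × String) := [("className", p.1)]
  if p.2 == 0 then (acc.1 ++ [class_info], acc.2.1, acc.2.2)
  else if p.2 == 1 then (acc.1, acc.2.1, acc.2.2 ++ [class_info])
  else if p.2 == 2 then (acc.1, acc.2.1 ++ [class_info], acc.2.2)
  else acc

def map_class_labels_to_categories (class_labels_dict : List (String × Int)) : List (String × List (List (String × String))) :=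
  let st := class_labels_dict.foldl pvStepA ([], [], [])
  [("applicationClasses", st.1), ("entityClasses", st.2.1), ("utilityClasses", st.2.2)]

-- ===== PORT B =====
def pvInfo (p : String × Int) : List (String × String) := [("className", p.1)]

def map_class_labels_to_categories_alt (class_labels_dict : List (String × Int)) : List (String × List (List (String × String))) :=
  let kept := class_labels_dict.filter (fun p => p.2 == 0 || p.2 == 1 || p.2 == 2)
  let srt := PySem.List.sorted kept (fun p => p.2)
  let infos := srt.map pvInfo
  let labels := srt.map (fun p => p.2)
  let n0 : Nat := PySem.List.count labels 0
  let n01 : Nat := n0 + PySem.List.count labels 1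
  [("applicationClasses", PySem.List.slice infos none (some (n0 : Int))),
   ("entityClasses", PySem.List.slice infos (some (n01 : Int)) none),
   ("utilityClasses", PySem.List.slice infos (some (n0 : Int)) (some (n01 : Int)))]

-- ===== PRECONDITION & SPEC =====
def Spec_map_class_labels_to_categories (class_labels_dict : List (String × Int)) (out : List (String × List (List (String × String)))) : Prop := out = map_class_labels_to_categories_alt class_labels_dict
instance (class_labels_dict : List (String × Int)) (out : List (String × List (List (String × String)))) : Decidable (Spec_map_class_labels_to_categories class_labels_dict out) := by unfold Spec_map_class_labels_to_categories; infer_instance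

-- ===== CLAIM (what is proved, stated in full; the proofs are below) =====
def Claim_equal_map_class_labels_to_categories : Prop := ∀ (class_labels_dict : List (String × Int)), Dom_map_class_labels_to_categories class_labels_dict → Spec_map_class_labels_to_categories class_labels_dict (map_class_labels_to_categories class_labels_dict)

-- ===== LEMMAS AND PROOFS =====
theorem pvFoldA_eq (d : List (String × Int))
    (a e u : List (List (String × String))) :
    d.foldl pvStepA (a, e, u) =
      (a ++ (d.filter (fun p => p.2 == 0)).map pvInfo,
       e ++ (d.filter (fun p => p.2 == 2)).map pvInfo,
       u ++ (d.filter (fun p => p.2 == 1)).map pvInfo) := by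
  induction d generalizing a e u with
  | nil => simp
  | cons p t ih =>
      simp only [List.foldl_cons, pvStepA]
      split_ifs with h0 h1 h2 <;>
        simp_all [pvInfo, List.append_assoc]

theorem pvInsertBy_append {α : Type} (p : α → α → Bool) (x : α) (ys zs : List α)
    (h : ∀ y ∈ ys, p x y = false) :
    PySem.List.insertBy p x (ys ++ zs) = ys ++ PySem.List.insertBy p x zs := by
  induction ys with
  | nil => simp
  | cons y t ih =>
      have hy : p x y = false := h y (by simp)
      simp [PySem.List.insertBy, hy, ih (fun z hz => h z (by simp [hz]))]

theorem pvInsertBy_front {α : Type} (p : α → α → Bool) (x : α) (zs : List α)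
    (h : ∀ y ∈ zs, p x y = true) :
    PySem.List.insertBy p x zs = x :: zs := by
  cases zs with
  | nil => simp [PySem.List.insertBy]
  | cons y t => simp [PySem.List.insertBy, h y (by simp)]

theorem pvSortFold (d : List (String × Int)) (b0 b1 b2 : List (String × Int))
    (h0 : ∀ q ∈ b0, q.2 = 0) (h1 : ∀ q ∈ b1, q.2 = 1) (h2 : ∀ q ∈ b2, q.2 = 2)
    (hd : ∀ q ∈ d, q.2 = 0 ∨ q.2 = 1 ∨ q.2 = 2) :
    d.foldl (fun acc x => PySem.List.insertBy (fun a b => decide (a.2 < b.2)) x acc)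
        (b0 ++ b1 ++ b2) =
      (b0 ++ d.filter (fun p => p.2 == 0)) ++ (b1 ++ d.filter (fun p => p.2 == 1))
        ++ (b2 ++ d.filter (fun p => p.2 == 2)) := by
  induction d generalizing b0 b1 b2 with
  | nil => simp
  | cons x t ih =>
      have hx := hd x (by simp)
      have ht : ∀ q ∈ t, q.2 = 0 ∨ q.2 = 1 ∨ q.2 = 2 := fun q hq => hd q (by simp [hq])
      simp only [List.foldl_cons]
      rcases hx with hx | hx | hx
      · -- label 0: skip b0, land in front of b1 ++ b2
        have e1 : PySem.List.insertBy (fun a b => decide (a.2 < b.2)) x (b0 ++ b1 ++ b2)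
            = (b0 ++ [x]) ++ b1 ++ b2 := by
          rw [List.append_assoc,
            pvInsertBy_append _ x b0 (b1 ++ b2) (by intro y hy; simp [h0 y hy, hx]),
            pvInsertBy_front _ x (b1 ++ b2) (by
              intro y hy
              rcases List.mem_append.1 hy with hy | hy
              · simp [h1 y hy, hx]
              · simp [h2 y hy, hx])]
          simp [List.append_assoc]
        rw [e1, ih (b0 ++ [x]) b1 b2
          (by intro q hq; rcases List.mem_append.1 hq with hq | hq
              · exact h0 q hq
              · simp at hq; simp [hq, hx])
          h1 h2 ht]
        simp [hx, List.append_assoc]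
      · -- label 1: skip b0 ++ b1, land in front of b2
        have e1 : PySem.List.insertBy (fun a b => decide (a.2 < b.2)) x (b0 ++ b1 ++ b2)
            = b0 ++ (b1 ++ [x]) ++ b2 := by
          rw [pvInsertBy_append _ x (b0 ++ b1) b2 (by
              intro y hy
              rcases List.mem_append.1 hy with hy | hy
              · simp [h0 y hy, hx]
              · simp [h1 y hy, hx]),
            pvInsertBy_front _ x b2 (by intro y hy; simp [h2 y hy, hx])]
          simp [List.append_assoc]
        rw [e1, ih b0 (b1 ++ [x]) b2 h0
          (by intro q hq; rcases List.mem_append.1 hq with hq | hq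
              · exact h1 q hq
              · simp at hq; simp [hq, hx])
          h2 ht]
        simp [hx, List.append_assoc]
      · -- label 2: goes to the very end
        have e1 : PySem.List.insertBy (fun a b => decide (a.2 < b.2)) x (b0 ++ b1 ++ b2)
            = b0 ++ b1 ++ (b2 ++ [x]) := by
          rw [PySem.List.insertBy_of_forall_not_before _ x (b0 ++ b1 ++ b2) (by
            intro y hy
            rcases List.mem_append.1 hy with hy | hy
            · rcases List.mem_append.1 hy with hy | hy
              · simp [h0 y hy, hx]
              · simp [h1 y hy, hx]
            · simp [h2 y hy, hx])]
          simp [List.append_assoc]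
        rw [e1, ih b0 b1 (b2 ++ [x]) h0 h1
          (by intro q hq; rcases List.mem_append.1 hq with hq | hq
              · exact h2 q hq
              · simp at hq; simp [hq, hx])
          ht]
        simp [hx, List.append_assoc]

-- the sorted kept list is exactly the three label blocks in order
theorem pvSorted_blocks (d : List (String × Int)) :
    PySem.List.sorted (d.filter (fun p => p.2 == 0 || p.2 == 1 || p.2 == 2))
        (fun p => p.2) =
      d.filter (fun p => p.2 == 0) ++ d.filter (fun p => p.2 == 1)
        ++ d.filter (fun p => p.2 == 2) := by
  rw [PySem.List.sorted_eq_foldl_insertBy]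
  have h := pvSortFold (d.filter (fun p => p.2 == 0 || p.2 == 1 || p.2 == 2)) [] [] []
    (by simp) (by simp) (by simp)
    (by intro q hq; have := List.of_mem_filter hq; simp at this; tauto)
  simp only [List.nil_append, List.append_nil] at h
  have f0 : (d.filter (fun p => p.2 == 0 || p.2 == 1 || p.2 == 2)).filter (fun p => p.2 == 0)
      = d.filter (fun p => p.2 == 0) := by
    rw [List.filter_filter]
    apply List.filter_congr
    intro p _
    by_cases hp : p.2 = 0 <;> simp [hp]
  have f1 : (d.filter (fun p => p.2 == 0 || p.2 == 1 || p.2 == 2)).filter (fun p => p.2 == 1)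
      = d.filter (fun p => p.2 == 1) := by
    rw [List.filter_filter]
    apply List.filter_congr
    intro p _
    by_cases hp : p.2 = 1 <;> simp [hp]
  have f2 : (d.filter (fun p => p.2 == 0 || p.2 == 1 || p.2 == 2)).filter (fun p => p.2 == 2)
      = d.filter (fun p => p.2 == 2) := by
    rw [List.filter_filter]
    apply List.filter_congr
    intro p _
    by_cases hp : p.2 = 2 <;> simp [hp]
  rw [h, f0, f1, f2]

theorem pvCount_zero_of_all_ne (l : List Int) (v : Int) (h : ∀ x ∈ l, x ≠ v) :
    List.count v l = 0 :=
  List.count_eq_zero.2 (fun hv => (h v hv) rfl)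

-- ===== VERDICT (by name: the statement is the Claim_ definition above) =====
theorem map_class_labels_to_categories_spec : Claim_equal_map_class_labels_to_categories := by
  intro d _
  simp only [Spec_map_class_labels_to_categories, map_class_labels_to_categories,
    map_class_labels_to_categories_alt]
  rw [pvFoldA_eq d [] [] [], pvSorted_blocks d]
  simp only [List.nil_append]
  set F0 := d.filter (fun p => p.2 == 0) with hF0
  set F1 := d.filter (fun p => p.2 == 1) with hF1
  set F2 := d.filter (fun p => p.2 == 2) with hF2
  have l0 : ∀ q ∈ F0, q.2 = 0 := by intro q hq; have := List.of_mem_filter hq; simpa using this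
  have l1 : ∀ q ∈ F1, q.2 = 1 := by intro q hq; have := List.of_mem_filter hq; simpa using this
  have l2 : ∀ q ∈ F2, q.2 = 2 := by intro q hq; have := List.of_mem_filter hq; simpa using this
  -- the counts are the block lengths
  have cEq : ∀ (F : List (String × Int)) (v : Int), (∀ q ∈ F, q.2 = v) →
      List.count v (List.map (fun p => p.2) F) = F.length := by
    intro F v h
    rw [List.count_eq_length.2 (by intro b hb; obtain ⟨q, hq, rfl⟩ := List.mem_map.1 hb; simp [h q hq])]
    simp
  have cNe : ∀ (F : List (String × Int)) (v w : Int), (∀ q ∈ F, q.2 = w) → w ≠ v →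
      List.count v (List.map (fun p => p.2) F) = 0 := by
    intro F v w h hne
    exact pvCount_zero_of_all_ne _ _ (by intro x hx; obtain ⟨q, hq, rfl⟩ := List.mem_map.1 hx; simp [h q hq, hne])
  have hc0 : PySem.List.count (((F0 ++ F1 ++ F2)).map (fun p => p.2)) (0 : Int) = F0.length := by
    rw [PySem.List.count_eq]
    simp only [List.map_append, List.count_append]
    rw [cEq F0 0 l0, cNe F1 0 1 l1 (by norm_num), cNe F2 0 2 l2 (by norm_num)]
    simp
  have hc1 : PySem.List.count (((F0 ++ F1 ++ F2)).map (fun p => p.2)) (1 : Int) = F1.length := by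
    rw [PySem.List.count_eq]
    simp only [List.map_append, List.count_append]
    rw [cEq F1 1 l1, cNe F0 1 0 l0 (by norm_num), cNe F2 1 2 l2 (by norm_num)]
    simp
  simp only [hc0, hc1]
  -- the three slices of the mapped blocks
  have e1 : PySem.List.slice ((F0 ++ F1 ++ F2).map pvInfo) none (some (F0.length : Int))
      = F0.map pvInfo := by
    rw [PySem.List.slice_to_natCast]
    rw [show (F0.length = (F0.map pvInfo).length) by simp]
    rw [show ((F0 ++ F1 ++ F2).map pvInfo
        = F0.map pvInfo ++ (F1.map pvInfo ++ F2.map pvInfo)) by simp]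
    exact List.take_left
  have e2 : PySem.List.slice ((F0 ++ F1 ++ F2).map pvInfo)
        (some ((F0.length + F1.length : Nat) : Int)) none = F2.map pvInfo := by
    rw [show (F0.length + F1.length = (F0.map pvInfo ++ F1.map pvInfo).length) by simp]
    rw [PySem.List.slice_from_natCast]
    rw [show ((F0 ++ F1 ++ F2).map pvInfo
        = (F0.map pvInfo ++ F1.map pvInfo) ++ F2.map pvInfo) by simp]
    exact List.drop_left
  have e3 : PySem.List.slice ((F0 ++ F1 ++ F2).map pvInfo) (some (F0.length : Int))
        (some ((F0.length + F1.length : Nat) : Int)) = F1.map pvInfo := by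
    rw [PySem.List.slice_natCast]
    rw [show (F0.length + F1.length - F0.length = F1.length) by omega]
    rw [show ((F0 ++ F1 ++ F2).map pvInfo
        = F0.map pvInfo ++ (F1.map pvInfo ++ F2.map pvInfo)) by simp]
    rw [show (F0.length = (F0.map pvInfo).length) by simp, List.drop_left]
    rw [show (F1.length = (F1.map pvInfo).length) by simp]
    exact List.take_left
  rw [e1, e2, e3]
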